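-- pv_equiv track=rewrite | github.com/jeff-donovan/aoc-2024 | day_21/part2.py | directional_to_directional_using_group_by_A
-- ===== SOURCE A (Python) =====
-- import copy
--
-- DIRECTIONAL_KEYPAD = {
--     'A': {
--         '<': '^',
--         'v': '>'
--     },
--     '^': {
--         '>': 'A',
--         'v': 'v',
--     },
--     '<': {
--         '>': 'v',
--     },
--     '>': {
--         '<': 'v',
--         '^': 'A'
--     },
--     'v': {
--         '<': '<',
--         '>': '>',
--         '^': '^',
--     },
-- }
--
-- def find_shortest_paths(keypad, start_char, end_char, visited=None):
--     if visited is None: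
--         visited = []
--
--     if start_char in visited:
--         return []
--
--     if start_char == end_char:
--         return [['A']]
--
--     paths = []
--     for direction, next_start_char in keypad[start_char].items():
--         next_paths = [[direction] + path for path in find_shortest_paths(keypad, next_start_char, end_char, visited + [start_char])]
--         paths += next_paths
--
--     return [path for path in paths if len(path) == calculate_min_path_length(paths)]
--
-- def calculate_min_path_length(paths):
--     return min([len(path) for path in paths])
--
-- def directional_to_directional_using_group_by_A(cache, seq):
--     # TODO: figure out where to add to the cache - think we need to make sure that we re-use calculations (especially in the "winner" method) otherwise we'll go nuts
--     directional_to_directional_split = [directional_to_directional(a_seq) for a_seq in group_by_A(seq)]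
--     combos = [[]]
--     for split in directional_to_directional_split:
--         new_combos = []
--         for path in split:
--             for combo in combos:
--                 new_combo = copy.deepcopy(combo)
--                 new_combo.extend(path)
--                 new_combos.append(new_combo)
--         combos = new_combos
--     return combos
--
-- def group_by_A(seq):
--     a_indices = [i for i, char in enumerate(seq) if char == 'A']
--     new_sequences = []
--     start = 0
--     for a_index in a_indices:
--         new_sequences.append(seq[start : a_index + 1])
--         start = a_index + 1
--     return new_sequences
--
-- def directional_to_directional(directional_seq):
--     sequences = [[]]
--     for i in range(len(directional_seq)):
--         if i == 0:
--             start = 'A'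
--         else:
--             start = directional_seq[i - 1]
--         end = directional_seq[i]
--         paths = find_shortest_paths(DIRECTIONAL_KEYPAD, start, end)
--         new_sequences = []
--         for path in paths:
--             for seq in sequences:
--                 new_sequences.append(seq + path)
--         sequences = new_sequences
--     return sequences
-- ===== SOURCE B (Python) =====
-- DIRECTIONAL_KEYPAD = {
--     'A': {
--         '<': '^',
--         'v': '>'
--     },
--     '^': {
--         '>': 'A',
--         'v': 'v',
--     },
--     '<': {
--         '>': 'v',
--     },
--     '>': {
--         '<': 'v',
--         '^': 'A'
--     },
--     'v': {
--         '<': '<',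
--         '>': '>',
--         '^': '^',
--     },
-- }
--
--
-- def _shortest_paths(start, end):
--     # breadth-first search by levels: the first level that reaches `end`
--     # holds exactly the shortest simple paths, already in choice order
--     if start == end:
--         return [['A']]
--     frontier = [(start, [], [])]  # (node, directions so far, nodes already left)
--     while frontier:
--         found = []
--         next_frontier = []
--         for node, dirs, visited in frontier:
--             for direction, neighbour in DIRECTIONAL_KEYPAD[node].items():
--                 if neighbour == end:
--                     found.append(dirs + [direction, 'A'])
--                 elif neighbour != node and neighbour not in visited:
--                     next_frontier.append((neighbour, dirs + [direction], visited + [node]))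
--         if found:
--             return found
--         frontier = next_frontier
--     return []
--
--
-- def _expand(step_paths):
--     # Cartesian combination, rightmost step varying slowest
--     if not step_paths:
--         return [[]]
--     rest = _expand(step_paths[1:])
--     return [p + r for r in rest for p in step_paths[0]]
--
--
-- def directional_to_directional_using_group_by_A(cache, seq):
--     # one pass over seq collecting (previous, current) key transitions,
--     # committed whenever an 'A' closes a group (the tail after the last 'A' is dropped)
--     steps, pending, prev = [], [], 'A'
--     for ch in seq:
--         pending.append((prev, ch))
--         prev = ch
--         if ch == 'A':
--             steps.extend(pending)
--             pending = []
--     return _expand([_shortest_paths(s, e) for (s, e) in steps])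
-- ===== Notes on version B (the rewrite author's own statement) =====
-- stated objective: alternative
-- what changed: B replaces A's DFS-enumerate-all-simple-paths-then-filter-by-min shortest-path search with a level-by-level BFS that stops at the first hit, replaces group_by_A's enumerate/index/slice machinery with a single pass over seq collecting (prev, ch) transition pairs flushed at each 'A', and replaces the iterative deepcopy-based Cartesian accumulation over per-group splits with one structural recursion over the flat per-transition path lists.
import Mathlib
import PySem

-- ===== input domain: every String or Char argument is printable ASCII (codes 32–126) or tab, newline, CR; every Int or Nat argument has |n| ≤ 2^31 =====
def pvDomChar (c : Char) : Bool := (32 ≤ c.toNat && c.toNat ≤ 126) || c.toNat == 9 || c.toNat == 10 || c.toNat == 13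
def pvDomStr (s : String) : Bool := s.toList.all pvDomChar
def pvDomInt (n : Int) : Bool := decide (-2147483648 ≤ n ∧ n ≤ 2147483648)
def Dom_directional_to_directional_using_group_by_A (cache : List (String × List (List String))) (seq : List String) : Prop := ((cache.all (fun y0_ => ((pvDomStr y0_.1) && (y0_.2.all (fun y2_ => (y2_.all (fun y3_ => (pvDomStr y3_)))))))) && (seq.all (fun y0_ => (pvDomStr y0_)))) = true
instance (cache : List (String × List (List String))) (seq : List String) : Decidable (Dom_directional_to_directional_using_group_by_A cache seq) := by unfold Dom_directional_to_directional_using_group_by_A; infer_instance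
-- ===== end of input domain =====

-- B replaces A's DFS-then-filter path search by a level BFS, the index/slice grouping by one
-- pass collecting (prev, ch) transitions flushed at each 'A', and the iterative deepcopy
-- product accumulation by a structural recursion (objective: alternative; same output).

-- ===== PORT A =====
def pvDirectionalKeypad : PySem.Dict String (PySem.Dict String String) :=
  PySem.Dict.ofList
    [ ("A", PySem.Dict.ofList [("<", "^"), ("v", ">")]),
      ("^", PySem.Dict.ofList [(">", "A"), ("v", "v")]),
      ("<", PySem.Dict.ofList [(">", "v")]),
      (">", PySem.Dict.ofList [("<", "v"), ("^", "A")]),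
      ("v", PySem.Dict.ofList [("<", "<"), (">", ">"), ("^", "^")]) ]

-- min([len(path) for path in paths]); only ever called with paths ≠ [] (inside the filter)
def pvCalcMinPathLength (paths : List (List String)) : Int :=
  (PySem.List.min? (paths.map (fun p => (p.length : Int))) (fun x => x)).getD 0

-- find_shortest_paths; the fuel argument only makes the recursion total: on every call A
-- performs (visited nodup, drawn from the 5 keypad keys) the depth never reaches 10.
-- keypad[start_char] is Dict.getD: the KeyError case (start not a key) is outside Pre_.
def pvFindShortestPaths (fuel : Nat) (keypad : PySem.Dict String (PySem.Dict String String))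
    (startChar endChar : String) (visited : List String) : List (List String) :=
  match fuel with
  | 0 => []
  | f + 1 =>
    if visited.contains startChar then []
    else if startChar == endChar then [["A"]]
    else
      let paths := (PySem.Dict.getD keypad startChar PySem.Dict.empty).items.foldl
        (fun paths dn =>
          paths ++ (pvFindShortestPaths f keypad dn.2 endChar (visited ++ [startChar])).map
            (fun path => dn.1 :: path)) []
      paths.filter (fun path => (path.length : Int) == pvCalcMinPathLength paths)

def pvDirectionalToDirectional (directionalSeq : List String) : List (List String) :=
  (PySem.List.pyRange 0 (PySem.List.len directionalSeq) 1).foldl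
    (fun sequences i =>
      let start := if i == 0 then "A" else PySem.List.pyGetD directionalSeq (i - 1) ""
      let «end» := PySem.List.pyGetD directionalSeq i ""
      let paths := pvFindShortestPaths 10 pvDirectionalKeypad start «end» []
      paths.foldl (fun newSequences path =>
        newSequences ++ sequences.map (fun s => s ++ path)) [])
    [[]]

def pvGroupByA (seq : List String) : List (List String) :=
  let aIndices : List Int :=
    ((PySem.List.enumerate seq).filter (fun p => p.2 == "A")).map (fun p => p.1)
  (aIndices.foldl
    (fun (acc : List (List String) × Int) aIndex =>
      (acc.1 ++ [PySem.List.slice seq (some acc.2) (some (aIndex + 1))], aIndex + 1))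
    ([], 0)).1

def directional_to_directional_using_group_by_A (cache : List (String × List (List String))) (seq : List String) : List (List String) :=
  let split := (pvGroupByA seq).map pvDirectionalToDirectional
  split.foldl
    (fun combos split =>
      split.foldl (fun newCombos path =>
        newCombos ++ combos.map (fun combo => combo ++ path)) [])
    [[]]

-- ===== PORT B =====
-- one BFS level: expand every frontier entry (node, dirs, visited) over its neighbours
def pvBfsLevel (endChar : String) (frontier : List (String × List String × List String)) :
    List (List String) × List (String × List String × List String) :=
  frontier.foldl
    (fun acc t =>
      (PySem.Dict.getD pvDirectionalKeypad t.1 PySem.Dict.empty).items.foldl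
        (fun acc dn =>
          if dn.2 == endChar then (acc.1 ++ [t.2.1 ++ [dn.1, "A"]], acc.2)
          else if dn.2 != t.1 && !t.2.2.contains dn.2 then
            (acc.1, acc.2 ++ [(dn.2, t.2.1 ++ [dn.1], t.2.2 ++ [t.1])])
          else acc)
        acc)
    ([], [])

-- the `while frontier:` loop; fuel only for totality (visited grows inside the 5 keys,
-- so on every call B performs the frontier empties before 10 levels)
def pvBfsRun (endChar : String) (fuel : Nat)
    (frontier : List (String × List String × List String)) : List (List String) :=
  match fuel with
  | 0 => []
  | f + 1 =>
    if frontier.isEmpty then []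
    else
      let lv := pvBfsLevel endChar frontier
      if !lv.1.isEmpty then lv.1 else pvBfsRun endChar f lv.2

def pvShortestPathsB (startChar endChar : String) : List (List String) :=
  if startChar == endChar then [["A"]]
  else pvBfsRun endChar 10 [(startChar, [], [])]

-- _expand: [p + r for r in _expand(rest) for p in first]
def pvExpand : List (List (List String)) → List (List String)
  | [] => [[]]
  | s :: rest => (pvExpand rest).flatMap (fun r => s.map (fun p => p ++ r))

def directional_to_directional_using_group_by_A_alt (cache : List (String × List (List String))) (seq : List String) : List (List String) :=
  let st := seq.foldl
    (fun (acc : List (String × String) × List (String × String) × String) ch =>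
      let pending := acc.2.1 ++ [(acc.2.2, ch)]
      if ch == "A" then (acc.1 ++ pending, [], ch) else (acc.1, pending, ch))
    ([], [], "A")
  pvExpand (st.1.map (fun p => pvShortestPathsB p.1 p.2))

-- ===== PRECONDITION & SPEC =====
-- Pre_ excludes exactly the inputs on which Python A raises KeyError: a sequence element
-- strictly before the last 'A' that is not one of the five directional-keypad keys
-- (it is then used as a lookup key in DIRECTIONAL_KEYPAD).
def Pre_directional_to_directional_using_group_by_A (cache : List (String × List (List String))) (seq : List String) : Prop :=
  ∀ i ∈ List.range seq.length, ("A" ∈ seq.drop (i + 1)) →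
    seq.getD i "" ∈ (["A", "^", "v", "<", ">"] : List String)
instance (cache : List (String × List (List String))) (seq : List String) : Decidable (Pre_directional_to_directional_using_group_by_A cache seq) := by unfold Pre_directional_to_directional_using_group_by_A; infer_instance

def pvWitness_directional_to_directional_using_group_by_A : (List (String × List (List String))) × List String :=
  ([], ["<", "A", "v", "A"])

def Spec_directional_to_directional_using_group_by_A (cache : List (String × List (List String))) (seq : List String) (out : List (List String)) : Prop := out = directional_to_directional_using_group_by_A_alt cache seq
instance (cache : List (String × List (List String))) (seq : List String) (out : List (List String)) : Decidable (Spec_directional_to_directional_using_group_by_A cache seq out) := by unfold Spec_directional_to_directional_using_group_by_A; infer_instance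

-- ===== CLAIM (what is proved, stated in full; the proofs are below) =====
def Claim_equal_directional_to_directional_using_group_by_A : Prop := ∀ (cache : List (String × List (List String))) (seq : List String), Dom_directional_to_directional_using_group_by_A cache seq → Pre_directional_to_directional_using_group_by_A cache seq → Spec_directional_to_directional_using_group_by_A cache seq (directional_to_directional_using_group_by_A cache seq)

-- ===== LEMMAS AND PROOFS =====


-- proof-side vocabulary: the Cartesian-product step both programs implement,
-- the transition-pair list, and characterisations of A's index machinery
def pvK : List String := ["A", "^", "v", "<", ">"]

def pvStep (combos split : List (List String)) : List (List String) :=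
  split.flatMap (fun path => combos.map (· ++ path))

def pvProd (T : List (List (List String))) : List (List String) := T.foldl pvStep [[]]

def pvPairs : String → List String → List (String × String)
  | _, [] => []
  | prev, c :: u => if "A" ∈ c :: u then (prev, c) :: pvPairs c u else []

def pvLeft : String → List String → List (String × String)
  | _, [] => []
  | prev, c :: u => if "A" ∈ c :: u then pvLeft c u else (prev, c) :: pvLeft c u

def pvLast : String → List String → String
  | p, [] => p
  | _, c :: u => pvLast c u

def pvAIdx : List String → List Nat
  | [] => []
  | c :: u => (if c = "A" then [0] else []) ++ (pvAIdx u).map (· + 1)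

def pvGOf (seq : List String) : Nat → List Nat → List (List String)
  | _, [] => []
  | s, a :: I => ((seq.drop s).take (a + 1 - s)) :: pvGOf seq (a + 1) I

def pvZ (prev : String) (g : List String) : List (String × String) := List.zip (prev :: g) g

def pvFlatZ : String → List (List String) → List (String × String)
  | _, [] => []
  | prev, g :: rest => pvZ prev g ++ (rest.map (pvZ "A")).flatten

def pvFA : String × String → List (List String) := fun pr => pvFindShortestPaths 10 pvDirectionalKeypad pr.1 pr.2 []
def pvFB : String × String → List (List String) := fun pr => pvShortestPathsB pr.1 pr.2

-- ---- product-step algebra ----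
theorem pvStep_unit (c : List (List String)) : pvStep c [[]] = c := by simp [pvStep]

theorem pvStep_nil_init (s : List (List String)) : pvStep [[]] s = s := by simp [pvStep]

theorem pvStep_assoc (c s X : List (List String)) :
    pvStep (pvStep c s) X = pvStep c (pvStep s X) := by
  simp [pvStep, List.map_flatMap, List.flatMap_map, List.map_map, Function.comp_def,
    List.flatMap_assoc]

theorem pvFoldl_step (T : List (List (List String))) :
    ∀ c, T.foldl pvStep c = pvStep c (pvProd T) := by
  induction T with
  | nil => intro c; simp [pvProd, pvStep_unit]
  | cons s T ih =>
      intro c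
      simp only [pvProd, List.foldl_cons] at *
      rw [ih, ih (pvStep [[]] s), pvStep_nil_init, pvStep_assoc]

theorem pvProd_cons (s : List (List String)) (T : List (List (List String))) :
    pvProd (s :: T) = pvStep s (pvProd T) := by
  simp only [pvProd, List.foldl_cons]
  rw [pvFoldl_step, pvStep_nil_init]
  rfl

theorem pvFoldl_map_prod (Ts : List (List (List (List String)))) :
    ∀ c, (Ts.map pvProd).foldl pvStep c = Ts.flatten.foldl pvStep c := by
  induction Ts with
  | nil => intro c; simp
  | cons T Ts ih =>
      intro c
      simp only [List.map_cons, List.foldl_cons, List.flatten_cons, List.foldl_append]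
      rw [ih, pvFoldl_step T c]

theorem pvExpand_eq (L : List (List (List String))) : pvExpand L = pvProd L := by
  induction L with
  | nil => simp [pvExpand, pvProd]
  | cons s L ih =>
      rw [pvProd_cons, ← ih]
      simp [pvExpand, pvStep]

theorem pvInner (split combos acc : List (List String)) :
    split.foldl (fun newCombos path => newCombos ++ combos.map (fun combo => combo ++ path)) acc
      = acc ++ pvStep combos split := by
  simpa [pvStep] using
    PySem.List.foldl_append_eq_flatMap (fun path => combos.map (· ++ path)) split acc

-- ---- A's per-group loop as a fold over transition pairs ----
theorem pvZ_index (g : List String) :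
    (List.range g.length).map
        (fun k => ((if k = 0 then "A" else g.getD (k - 1) ""), g.getD k "")) = pvZ "A" g := by
  apply List.ext_getElem
  · simp [pvZ]
  · intro i h1 h2
    simp only [List.getElem_map, List.getElem_range, pvZ, List.getElem_zip]
    have hi : i < g.length := by simpa using h1
    cases i with
    | zero => simp [List.getElem?_eq_getElem hi]
    | succ j =>
        have hj : j < g.length := Nat.lt_of_succ_lt hi
        simp [List.getElem?_eq_getElem hi, List.getElem?_eq_getElem hj]

theorem pvD2D (g : List String) :
    pvDirectionalToDirectional g = pvProd ((pvZ "A" g).map pvFA) := by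
  unfold pvDirectionalToDirectional
  rw [PySem.List.len_eq, PySem.List.pyRange_zero_nat, List.foldl_map]
  have hcongr : ∀ (acc : List (List String)), ∀ k ∈ List.range g.length,
      (fun (sequences : List (List String)) (k : Nat) =>
        let start := if (k : Int) == 0 then "A" else PySem.List.pyGetD g ((k : Int) - 1) ""
        let «end» := PySem.List.pyGetD g (k : Int) ""
        let paths := pvFindShortestPaths 10 pvDirectionalKeypad start «end» []
        paths.foldl (fun newSequences path =>
          newSequences ++ sequences.map (fun s => s ++ path)) []) acc k
      = (fun (sequences : List (List String)) (k : Nat) =>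
          pvStep sequences (pvFA ((if k = 0 then "A" else g.getD (k - 1) ""), g.getD k ""))) acc k := by
    intro acc k _
    simp only [pvFA]
    rw [pvInner]
    cases k with
    | zero => simp [PySem.List.pyGetD_zero, List.getD]
    | succ j =>
        rw [List.nil_append]
        rw [show (((j + 1 : Nat) : Int) == 0) = false from beq_eq_false_iff_ne.mpr (by omega)]
        simp only [Bool.false_eq_true, if_false]
        rw [show (((j + 1 : Nat) : Int)) - 1 = ((j : Nat) : Int) from by push_cast; ring]
        rw [PySem.List.pyGetD_natCast, PySem.List.pyGetD_natCast]
        simp [List.getD]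
  rw [PySem.List.foldl_congr_mem _ _ _ _ hcongr]
  rw [← pvZ_index g]
  simp only [pvProd, List.map_map, List.foldl_map, Function.comp_def]

-- ---- A's group_by_A: enumerate/filter indices and slice fold ----
theorem pvEnumFilt (u : List String) : ∀ (s : Int),
    (((PySem.List.enumerate u s).filter (fun p => p.2 == "A")).map (fun p => p.1))
      = (pvAIdx u).map (fun (n : Nat) => (n : Int) + s) := by
  induction u with
  | nil => intro s; simp [pvAIdx, PySem.List.enumerate]
  | cons c u ih =>
      intro s
      rw [PySem.List.enumerate_cons]
      by_cases hc : c = "A"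
      · subst hc
        rw [List.filter_cons_of_pos (by simp), List.map_cons, ih (s + 1)]
        rw [show pvAIdx ("A" :: u) = 0 :: (pvAIdx u).map (· + 1) from by simp [pvAIdx]]
        rw [List.map_cons, List.map_map]
        congr 1
        · simp
        · apply List.map_congr_left
          intro n _
          simp only [Function.comp_apply]
          push_cast
          ring
      · rw [List.filter_cons_of_neg (by simp [hc]), ih (s + 1)]
        rw [show pvAIdx (c :: u) = (pvAIdx u).map (· + 1) from by simp [pvAIdx, hc]]
        rw [List.map_map]
        apply List.map_congr_left
        intro n _
        simp only [Function.comp_apply]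
        push_cast
        ring

theorem pvGFold (seq : List String) (I : List Nat) :
    ∀ (acc : List (List String)) (s : Nat),
    ((I.map (fun (n : Nat) => (n : Int))).foldl
      (fun (acc2 : List (List String) × Int) aIndex =>
        (acc2.1 ++ [PySem.List.slice seq (some acc2.2) (some (aIndex + 1))], aIndex + 1))
      (acc, (s : Int))).1 = acc ++ pvGOf seq s I := by
  induction I with
  | nil => intro acc s; simp [pvGOf]
  | cons a I ih =>
      intro acc s
      simp only [List.map_cons, List.foldl_cons]
      rw [show ((a : Int) + 1) = ((a + 1 : Nat) : Int) by push_cast; ring]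
      rw [PySem.List.slice_natCast, ih]
      simp only [pvGOf, List.append_assoc, List.singleton_append]

theorem pvGroupByA_eq (seq : List String) :
    pvGroupByA seq = pvGOf seq 0 (pvAIdx seq) := by
  unfold pvGroupByA
  rw [pvEnumFilt seq 0]
  simp only [add_zero]
  rw [show (0 : Int) = ((0 : Nat) : Int) from rfl, pvGFold]
  simp

-- ---- bridging A's groups to the flat transition-pair list ----
theorem pvFlatZ_A (gs : List (List String)) :
    pvFlatZ "A" gs = (gs.map (pvZ "A")).flatten := by
  cases gs <;> simp [pvFlatZ]

theorem pvAIdx_nil_iff (u : List String) : pvAIdx u = [] ↔ "A" ∉ u := by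
  induction u with
  | nil => simp [pvAIdx]
  | cons c u ih =>
      by_cases hc : c = "A"
      · subst hc; simp [pvAIdx]
      · have hc' : ¬ "A" = c := fun hh => hc hh.symm
        simp [pvAIdx, hc, ih, hc']

theorem pvGOf_shift (c : String) (u : List String) (I : List Nat) :
    ∀ s, pvGOf (c :: u) (s + 1) (I.map (· + 1)) = pvGOf u s I := by
  induction I with
  | nil => intro s; simp [pvGOf]
  | cons a I ih =>
      intro s
      simp only [List.map_cons, pvGOf, List.drop_succ_cons]
      rw [show a + 1 + 1 - (s + 1) = a + 1 - s by omega]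
      rw [show a + 1 + 1 = (a + 1) + 1 from rfl, ih (a + 1)]

theorem pvPairs_nil_of_not_mem (u : List String) (prev : String) (h : "A" ∉ u) :
    pvPairs prev u = [] := by
  cases u with
  | nil => rfl
  | cons c v => simp [pvPairs, h]

theorem pvZ_cons (prev c : String) (g : List String) :
    pvZ prev (c :: g) = (prev, c) :: pvZ c g := by
  simp [pvZ]

theorem pvBridge (seq : List String) :
    ∀ prev, pvFlatZ prev (pvGOf seq 0 (pvAIdx seq)) = pvPairs prev seq := by
  induction seq with
  | nil => intro prev; simp [pvAIdx, pvGOf, pvFlatZ, pvPairs]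
  | cons c u ih =>
      intro prev
      by_cases hc : c = "A"
      · subst hc
        have h1 : pvGOf ("A" :: u) 0 (pvAIdx ("A" :: u)) = ["A"] :: pvGOf u 0 (pvAIdx u) := by
          rw [show pvAIdx ("A" :: u) = 0 :: (pvAIdx u).map (· + 1) from by simp [pvAIdx]]
          simp only [pvGOf, List.drop_zero, Nat.sub_zero, Nat.zero_add, List.take_succ_cons,
            List.take_zero]
          congr 1
          exact pvGOf_shift "A" u (pvAIdx u) 0
        rw [h1]
        show pvZ prev ["A"] ++ ((pvGOf u 0 (pvAIdx u)).map (pvZ "A")).flatten = _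
        rw [← pvFlatZ_A, ih "A"]
        simp [pvZ, pvPairs]
      · cases h : pvAIdx u with
        | nil =>
            have hAu : "A" ∉ u := (pvAIdx_nil_iff u).mp h
            have h2 : pvAIdx (c :: u) = [] := by simp [pvAIdx, hc, h]
            rw [h2]
            have hnc : "A" ∉ c :: u := by
              intro hmm
              rcases List.mem_cons.mp hmm with h' | h'
              · exact hc h'.symm
              · exact hAu h'
            rw [pvPairs_nil_of_not_mem _ _ hnc]
            rfl
        | cons a I =>
            have hAu : "A" ∈ u := by
              by_contra hn
              rw [(pvAIdx_nil_iff u).mpr hn] at h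
              simp at h
            have h2 : pvAIdx (c :: u) = (a + 1) :: I.map (· + 1) := by
              simp [pvAIdx, hc, h]
            rw [h2]
            have h3 : pvGOf (c :: u) 0 ((a + 1) :: I.map (· + 1))
                = (c :: u.take (a + 1)) :: pvGOf u (a + 1) I := by
              simp only [pvGOf, List.drop_zero, Nat.sub_zero, List.take_succ_cons]
              rw [show a + 1 + 1 = (a + 1) + 1 from rfl, pvGOf_shift c u I (a + 1)]
            rw [h3]
            show pvZ prev (c :: u.take (a + 1)) ++ ((pvGOf u (a + 1) I).map (pvZ "A")).flatten = _
            rw [pvZ_cons]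
            have h4 : pvZ c (u.take (a + 1)) ++ ((pvGOf u (a + 1) I).map (pvZ "A")).flatten
                = pvFlatZ c (pvGOf u 0 (pvAIdx u)) := by
              rw [h]
              show _ = pvZ c ((u.drop 0).take (a + 1 - 0)) ++ _
              simp
            have h5 : pvPairs prev (c :: u) = (prev, c) :: pvPairs c u := by
              simp [pvPairs, hAu]
            rw [List.cons_append, h4, ih c, h5]

theorem pvBinv (u : List String) :
    ∀ (s p : List (String × String)) (prev : String),
    u.foldl
      (fun (acc : List (String × String) × List (String × String) × String) ch =>
        let pending := acc.2.1 ++ [(acc.2.2, ch)]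
        if ch == "A" then (acc.1 ++ pending, [], ch) else (acc.1, pending, ch))
      (s, p, prev)
    = (s ++ (if "A" ∈ u then p ++ pvPairs prev u else []),
       (if "A" ∈ u then pvLeft prev u else p ++ pvLeft prev u),
       pvLast prev u) := by
  induction u with
  | nil => intro s p prev; simp [pvLeft, pvLast]
  | cons c u ih =>
      intro s p prev
      simp only [List.foldl_cons]
      by_cases hc : c = "A"
      · subst hc
        simp only [BEq.rfl]
        rw [ih]
        have hnil := fun pr => pvPairs_nil_of_not_mem u pr
        by_cases hA : "A" ∈ u
        · simp [pvPairs, pvLeft, pvLast, hA, List.append_assoc]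
        · simp [pvPairs, pvLeft, pvLast, hA, hnil _ hA]
      · have hb : (c == "A") = false := by simp [hc]
        simp only [hb, Bool.false_eq_true, if_false]
        rw [ih]
        by_cases hA : "A" ∈ u
        · have hmc : "A" ∈ c :: u := List.mem_cons_of_mem _ hA
          simp [pvPairs, pvLeft, pvLast, hA, hmc, List.append_assoc]
        · have hnc : "A" ∉ c :: u := by
            intro hmm
            rcases List.mem_cons.mp hmm with h' | h'
            · exact hc h'.symm
            · exact hA h'
          simp [pvLeft, pvLast, hA, hnc, List.append_assoc]

-- ---- the two path searches agree on the five keypad keys ----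
theorem pvPathsK : ∀ s ∈ pvK, ∀ e ∈ pvK,
    pvFindShortestPaths 10 pvDirectionalKeypad s e [] = pvShortestPathsB s e := by decide

theorem pvPreCons (c : String) (u : List String) :
    (∀ i ∈ List.range (c :: u).length, ("A" ∈ (c :: u).drop (i + 1)) →
        (c :: u).getD i "" ∈ (["A", "^", "v", "<", ">"] : List String))
    ↔ (("A" ∈ u) → c ∈ (["A", "^", "v", "<", ">"] : List String))
      ∧ (∀ i ∈ List.range u.length, ("A" ∈ u.drop (i + 1)) →
          u.getD i "" ∈ (["A", "^", "v", "<", ">"] : List String)) := by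
  constructor
  · intro h
    refine ⟨fun hA => ?_, fun i hi hA => ?_⟩
    · have := h 0 (by simp) (by simpa using hA)
      simpa using this
    · have := h (i + 1) (by simp at hi ⊢; omega) (by simpa using hA)
      simpa using this
  · rintro ⟨h1, h2⟩ i hi hA
    cases i with
    | zero => simpa using h1 (by simpa using hA)
    | succ j =>
        have hj : j ∈ List.range u.length := by simp at hi ⊢; omega
        simpa using h2 j hj (by simpa using hA)

theorem pvPairsK (u : List String) :
    ∀ prev, prev ∈ pvK →
    (∀ i ∈ List.range u.length, ("A" ∈ u.drop (i + 1)) →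
        u.getD i "" ∈ (["A", "^", "v", "<", ">"] : List String)) →
    ∀ pr ∈ pvPairs prev u, pr.1 ∈ pvK ∧ pr.2 ∈ pvK := by
  induction u with
  | nil => intro prev _ _ pr hpr; simp [pvPairs] at hpr
  | cons c u ih =>
      intro prev hprev hpre pr hpr
      rw [pvPreCons] at hpre
      by_cases hmem : "A" ∈ c :: u
      · rw [pvPairs, if_pos hmem] at hpr
        have hcK : c ∈ pvK := by
          by_cases hA : "A" ∈ u
          · exact hpre.1 hA
          · have hca : c = "A" := by
              rcases List.mem_cons.mp hmem with h | h
              · exact h.symm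
              · exact absurd h hA
            simp [hca, pvK]
        rcases List.mem_cons.mp hpr with h | h
        · subst h; exact ⟨hprev, hcK⟩
        · exact ih c hcK hpre.2 pr h
      · rw [pvPairs, if_neg hmem] at hpr
        simp at hpr

-- ---- assembling the verdict ----
theorem pvAChar (cache : List (String × List (List String))) (seq : List String) :
    directional_to_directional_using_group_by_A cache seq
      = pvProd ((pvPairs "A" seq).map pvFA) := by
  unfold directional_to_directional_using_group_by_A
  have hfun : (fun (combos split : List (List String)) =>
      split.foldl (fun newCombos path => newCombos ++ combos.map (fun combo => combo ++ path)) [])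
      = pvStep := by
    funext combos split
    rw [pvInner]
    simp
  rw [hfun, pvGroupByA_eq]
  have hmap : (pvGOf seq 0 (pvAIdx seq)).map pvDirectionalToDirectional
      = ((pvGOf seq 0 (pvAIdx seq)).map (fun g => (pvZ "A" g).map pvFA)).map pvProd := by
    rw [List.map_map]
    apply List.map_congr_left
    intro g _
    exact pvD2D g
  rw [hmap, pvFoldl_map_prod]
  have hflat : ((pvGOf seq 0 (pvAIdx seq)).map (fun g => (pvZ "A" g).map pvFA)).flatten
      = (pvPairs "A" seq).map pvFA := by
    rw [show ((pvGOf seq 0 (pvAIdx seq)).map (fun g => (pvZ "A" g).map pvFA))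
          = ((pvGOf seq 0 (pvAIdx seq)).map (pvZ "A")).map (List.map pvFA) from by
        rw [List.map_map]; rfl]
    rw [← List.map_flatten, ← pvFlatZ_A, pvBridge]
  rw [hflat]
  rfl

theorem pvAltChar (cache : List (String × List (List String))) (seq : List String) :
    directional_to_directional_using_group_by_A_alt cache seq
      = pvProd ((pvPairs "A" seq).map pvFB) := by
  unfold directional_to_directional_using_group_by_A_alt
  rw [pvBinv seq [] [] "A"]
  by_cases hA : "A" ∈ seq
  · simp only [hA, if_true, List.nil_append]
    rw [pvExpand_eq]
    rfl
  · simp only [hA, if_false, pvPairs_nil_of_not_mem seq "A" hA]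
    rfl



-- ===== VERDICT (by name: the statement is the Claim_ definition above) =====
theorem directional_to_directional_using_group_by_A_spec : Claim_equal_directional_to_directional_using_group_by_A := by
  intro cache seq _ hpre
  unfold Spec_directional_to_directional_using_group_by_A
  unfold Pre_directional_to_directional_using_group_by_A at hpre
  rw [pvAChar, pvAltChar]
  congr 1
  apply List.map_congr_left
  intro pr hpr
  have hK := pvPairsK seq "A" (by simp [pvK]) hpre pr hpr
  simpa [pvFA, pvFB] using pvPathsK pr.1 hK.1 pr.2 hK.2
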